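-- pv_equiv track=rewrite | github.com/VacuumFreezer/dvqls_Seawulf | Partition_comparison_qjit/benchmark_13q_real_cluster_common.py | _local_chain_edge_layers
-- ===== SOURCE A (Python) =====
-- from typing import Callable, Dict, List, Sequence, Tuple
--
-- N_TOTAL_QUBITS = 13
--
-- def _local_chain_edge_layers(index_qubits: int) -> tuple[tuple[tuple[int, int], ...], tuple[tuple[int, int], ...], tuple[tuple[int, int], ...]]:
--     odd_edges: List[Tuple[int, int]] = []
--     even_edges: List[Tuple[int, int]] = []
--
--     for left_global in range(index_qubits + 1, N_TOTAL_QUBITS):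
--         left_local = left_global - (index_qubits + 1)
--         right_local = left_local + 1
--         edge = (left_local, right_local)
--         if left_global % 2 == 1:
--             odd_edges.append(edge)
--         else:
--             even_edges.append(edge)
--
--     all_edges = tuple(odd_edges + even_edges)
--     return tuple(odd_edges), tuple(even_edges), all_edges
-- ===== SOURCE B (Python) =====
-- from typing import List, Tuple
--
-- N_TOTAL_QUBITS = 13
--
-- def _local_chain_edge_layers(index_qubits: int) -> tuple[tuple[tuple[int, int], ...], tuple[tuple[int, int], ...], tuple[tuple[int, int], ...]]:
--     # Closed-form strided construction: edge i sits at global qubit index_qubits+1+i,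
--     # so edge parity alternates with i starting at parity index_qubits % 2.
--     n = max(0, N_TOTAL_QUBITS - (index_qubits + 1))
--     start = index_qubits % 2
--     odd = tuple((i, i + 1) for i in range(start, n, 2))
--     even = tuple((i, i + 1) for i in range(1 - start, n, 2))
--     return odd, even, odd + even
-- ===== Notes on version B (the rewrite author's own statement) =====
-- stated objective: simpler
-- what changed: Replaces the parity-branching accumulator loop by a closed-form strided construction: edge i has global parity (index_qubits+1+i) % 2, so the odd/even layers are generated directly as range(start, n, 2) / range(1-start, n, 2) with start = index_qubits % 2, no per-element branch.
import Mathlib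
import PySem

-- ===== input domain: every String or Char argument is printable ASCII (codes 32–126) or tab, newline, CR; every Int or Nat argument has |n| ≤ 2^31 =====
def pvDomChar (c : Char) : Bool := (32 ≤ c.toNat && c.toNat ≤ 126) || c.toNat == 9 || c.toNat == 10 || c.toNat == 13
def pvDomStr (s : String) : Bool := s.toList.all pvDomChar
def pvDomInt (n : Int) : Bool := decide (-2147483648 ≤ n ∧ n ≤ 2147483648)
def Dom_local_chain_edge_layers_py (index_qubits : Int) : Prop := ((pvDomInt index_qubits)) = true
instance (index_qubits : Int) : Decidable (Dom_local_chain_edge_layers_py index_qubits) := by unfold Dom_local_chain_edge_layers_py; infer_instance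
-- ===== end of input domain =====

-- B replaces A's parity-branching accumulator loop by a closed-form strided construction
-- (odd/even edge layers generated directly as step-2 ranges); objective: simpler.

-- ===== PORT A =====
-- the for-loop over range(index_qubits+1, N_TOTAL_QUBITS) carrying (odd_edges, even_edges)
def chainLoopA (q : Int) : List Int → List (Int × Int) → List (Int × Int) → List (Int × Int) × List (Int × Int)
  | [], o, e => (o, e)
  | lg :: rest, o, e =>
      let ll := lg - (q + 1)
      let rl := ll + 1
      let edge := (ll, rl)
      if PySem.Int.mod lg 2 == 1 then chainLoopA q rest (o ++ [edge]) e
      else chainLoopA q rest o (e ++ [edge])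

def local_chain_edge_layers_py (index_qubits : Int) : (List (Int × Int)) × (List (Int × Int)) × (List (Int × Int)) :=
  let p := chainLoopA index_qubits (PySem.List.pyRange (index_qubits + 1) 13 1) [] []
  (p.1, p.2, p.1 ++ p.2)

-- ===== PORT B =====
def local_chain_edge_layers_py_alt (index_qubits : Int) : (List (Int × Int)) × (List (Int × Int)) × (List (Int × Int)) :=
  let n := max 0 (13 - (index_qubits + 1))
  let start := PySem.Int.mod index_qubits 2
  let odd := (PySem.List.pyRange start n 2).map (fun i => (i, i + 1))
  let even := (PySem.List.pyRange (1 - start) n 2).map (fun i => (i, i + 1))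
  (odd, even, odd ++ even)

-- ===== PRECONDITION & SPEC =====
def Spec_local_chain_edge_layers_py (index_qubits : Int) (out : (List (Int × Int)) × (List (Int × Int)) × (List (Int × Int))) : Prop := out = local_chain_edge_layers_py_alt index_qubits
instance (index_qubits : Int) (out : (List (Int × Int)) × (List (Int × Int)) × (List (Int × Int))) : Decidable (Spec_local_chain_edge_layers_py index_qubits out) := by unfold Spec_local_chain_edge_layers_py; infer_instance

-- ===== CLAIM (what is proved, stated in full; the proofs are below) =====
def Claim_equal_local_chain_edge_layers_py : Prop := ∀ (index_qubits : Int), Dom_local_chain_edge_layers_py index_qubits → Spec_local_chain_edge_layers_py index_qubits (local_chain_edge_layers_py index_qubits)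

-- ===== LEMMAS AND PROOFS =====

-- A's loop, in filter/map form
theorem chainLoopA_spec (q : Int) : ∀ (l : List Int) (o e : List (Int × Int)),
    chainLoopA q l o e =
      (o ++ (l.filter (fun x => PySem.Int.mod x 2 == 1)).map (fun x => (x - (q + 1), x - (q + 1) + 1)),
       e ++ (l.filter (fun x => !(PySem.Int.mod x 2 == 1))).map (fun x => (x - (q + 1), x - (q + 1) + 1)))
  | [], o, e => by simp [chainLoopA]
  | lg :: rest, o, e => by
      by_cases h : lg % 2 = 1
      · rw [chainLoopA, if_pos (by simp [h]), chainLoopA_spec q rest]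
        simp [h]
      · rw [chainLoopA, if_neg (by simp [h]), chainLoopA_spec q rest]
        simp [h]

-- a parity-filtered initial segment of naturals is a step-2 arithmetic list
theorem strideNat (s : Nat) (hs : s ≤ 1) : ∀ (m : Nat),
    (List.range m).filter (fun k => k % 2 == s) = (List.range ((m + 1 - s) / 2)).map (fun j => 2 * j + s)
  | 0 => by
      have h : (0 + 1 - s) / 2 = 0 := by omega
      simp [h]
  | m + 1 => by
      rw [List.range_succ, List.filter_append, strideNat s hs m]
      by_cases h : m % 2 = s
      · have hc : (m + 1 + 1 - s) / 2 = (m + 1 - s) / 2 + 1 := by omega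
        have hv : 2 * ((m + 1 - s) / 2) + s = m := by omega
        simp [List.filter, h, hc, List.range_succ, hv]
      · have hb : (m % 2 == s) = false := by simp [h]
        have hc : (m + 1 + 1 - s) / 2 = (m + 1 - s) / 2 := by omega
        simp [List.filter, hb, hc]

-- one parity class: A's filtered/relabelled range equals B's step-2 range
theorem layer_eq (q : Int) (s : Nat) (hs : s ≤ 1) (p : Int → Bool)
    (hp : ∀ k : Nat, p (q + 1 + (k : Int)) = (k % 2 == s)) :
    ((PySem.List.pyRange (q + 1) 13 1).filter p).map (fun x => (x - (q + 1), x - (q + 1) + 1)) =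
      (PySem.List.pyRange (s : Int) (max 0 (13 - (q + 1))) 2).map (fun i => (i, i + 1)) := by
  rw [PySem.List.pyRange_one, PySem.List.pyRange_of_pos _ _ (by norm_num : (0:Int) < 2)]
  rw [List.filter_map, List.map_map, List.map_map]
  set m : Nat := (13 - (q + 1)).toNat with hm
  have hfilt : (List.range m).filter (p ∘ fun k : Nat => q + 1 + ↑k)
      = (List.range m).filter (fun k => k % 2 == s) := by
    apply List.filter_congr
    intro k _
    exact hp k
  rw [hfilt, strideNat s hs m]
  have hcnt : (if (s : Int) < max 0 (13 - (q + 1)) then ((max 0 (13 - (q + 1)) - ↑s + 2 - 1) / 2).toNat else 0)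
      = (m + 1 - s) / 2 := by
    simp only [hm]
    split_ifs with h <;> omega
  rw [hcnt, List.map_map]
  apply List.map_congr_left
  intro j _
  simp only [Function.comp, Prod.mk.injEq]
  refine ⟨by push_cast; ring, by push_cast; ring⟩

-- ===== VERDICT (by name: the statement is the Claim_ definition above) =====
theorem local_chain_edge_layers_py_spec : Claim_equal_local_chain_edge_layers_py := by
  intro q _
  unfold Spec_local_chain_edge_layers_py local_chain_edge_layers_py local_chain_edge_layers_py_alt
  rw [chainLoopA_spec]
  simp only [List.nil_append]
  have hmq : PySem.Int.mod q 2 = q % 2 := PySem.Int.mod_eq_emod_of_pos (by norm_num)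
  have hs1 : (q % 2).toNat ≤ 1 := by omega
  have hstart : PySem.Int.mod q 2 = (((q % 2).toNat : Nat) : Int) := by
    rw [hmq]; omega
  have hstart2 : 1 - PySem.Int.mod q 2 = (((1 - (q % 2).toNat : Nat) : Nat) : Int) := by
    rw [hmq]; omega
  have h1 := layer_eq q (q % 2).toNat hs1 (fun x => PySem.Int.mod x 2 == 1) (by
    intro k
    show (PySem.Int.mod (q + 1 + (k : Int)) 2 == 1) = (k % 2 == (q % 2).toNat)
    rw [PySem.Int.mod_eq_emod_of_pos (by norm_num : (0:Int) < 2)]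
    rw [Bool.eq_iff_iff]
    simp only [beq_iff_eq]
    omega)
  have h2 := layer_eq q (1 - (q % 2).toNat) (by omega) (fun x => !(PySem.Int.mod x 2 == 1)) (by
    intro k
    show (!(PySem.Int.mod (q + 1 + (k : Int)) 2 == 1)) = (k % 2 == 1 - (q % 2).toNat)
    rw [PySem.Int.mod_eq_emod_of_pos (by norm_num : (0:Int) < 2)]
    rw [Bool.eq_iff_iff]
    simp only [Bool.not_eq_true', beq_eq_false_iff_ne, beq_iff_eq, ne_eq]
    omega)
  rw [hstart2, hstart, h1, h2]
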